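-- pv_equiv track=rewrite | github.com/carlostoek/bolt_ok | mybot/services/rewards/cross_module_rewards.py | _get_narrative_milestone_points
-- ===== SOURCE A (Python) =====
-- def _get_narrative_milestone_points(fragment_key: str) -> int:
--     """Get points for narrative milestone."""
--     milestone_points = {
--         "level1_": 10,
--         "level2_": 15,
--         "level3_": 20,
--         "level4_": 25,
--         "level5_": 30
--     }
--
--     for prefix, points in milestone_points.items():
--         if fragment_key.startswith(prefix):
--             return points
--     return 5  # Default points
-- ===== SOURCE B (Python) =====
-- def _get_narrative_milestone_points(fragment_key: str) -> int:
--     """Closed-form: parse the level digit instead of scanning a prefix table."""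
--     if fragment_key.startswith("level") and len(fragment_key) >= 7:
--         d = fragment_key[5]
--         if d in "12345" and fragment_key[6] == "_":
--             return 5 + 5 * (ord(d) - 48)
--     return 5
-- ===== Notes on version B (the rewrite author's own statement) =====
-- stated objective: alternative
-- what changed: Replaces the prefix-table scan (a dict of five milestone prefixes tried in order) with a direct parse: check the common five-letter prefix, the length, the digit range and the underscore, and compute the points as 5 + 5*digit.
import Mathlib
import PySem

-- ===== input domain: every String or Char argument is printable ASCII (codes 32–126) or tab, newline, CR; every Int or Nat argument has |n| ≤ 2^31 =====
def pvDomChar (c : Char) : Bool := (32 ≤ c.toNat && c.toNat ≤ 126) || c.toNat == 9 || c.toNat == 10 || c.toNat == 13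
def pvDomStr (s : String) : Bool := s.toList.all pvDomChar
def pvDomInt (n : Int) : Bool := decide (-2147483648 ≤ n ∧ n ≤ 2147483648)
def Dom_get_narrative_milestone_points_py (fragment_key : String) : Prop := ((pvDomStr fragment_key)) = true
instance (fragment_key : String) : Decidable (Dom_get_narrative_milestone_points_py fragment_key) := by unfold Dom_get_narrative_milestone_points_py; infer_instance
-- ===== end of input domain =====

-- B replaces A's prefix-table scan with a direct parse of the level digit (alternative decomposition, same O(1) cost; return value only).


-- ===== PORT A =====
-- the 'for prefix, points in milestone_points.items(): if fragment_key.startswith(prefix): return points' loop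
def pvALoop : List (String × Int) → String → Int
  | [], _ => 5
  | (pre, points) :: rest, fk =>
      if PySem.Str.startswith fk pre then points else pvALoop rest fk

def get_narrative_milestone_points_py (fragment_key : String) : Int :=
  let milestone_points : List (String × Int) :=
    [("level1_", 10), ("level2_", 15), ("level3_", 20), ("level4_", 25), ("level5_", 30)]
  pvALoop milestone_points fragment_key

-- ===== PORT B =====
def get_narrative_milestone_points_py_alt (fragment_key : String) : Int :=
  if PySem.Str.startswith fragment_key "level" && decide (7 ≤ PySem.Str.len fragment_key) then
    match PySem.Str.pyGet? fragment_key 5, PySem.Str.pyGet? fragment_key 6 with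
    | some d, some u =>
        if PySem.Str.isIn (String.ofList [d]) "12345" && (u == '_') then
          5 + 5 * ((d.toNat : Int) - 48)
        else 5
    | _, _ => 5
  else 5

-- ===== PRECONDITION & SPEC =====
def Spec_get_narrative_milestone_points_py (fragment_key : String) (out : Int) : Prop := out = get_narrative_milestone_points_py_alt fragment_key
instance (fragment_key : String) (out : Int) : Decidable (Spec_get_narrative_milestone_points_py fragment_key out) := by unfold Spec_get_narrative_milestone_points_py; infer_instance

-- ===== CLAIM (what is proved, stated in full; the proofs are below) =====
def Claim_equal_get_narrative_milestone_points_py : Prop := ∀ (fragment_key : String), Dom_get_narrative_milestone_points_py fragment_key → Spec_get_narrative_milestone_points_py fragment_key (get_narrative_milestone_points_py fragment_key)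

-- ===== LEMMAS AND PROOFS =====

lemma isIn_sing_false (d : Char) (h : ¬ (d = '1' ∨ d = '2' ∨ d = '3' ∨ d = '4' ∨ d = '5')) :
    PySem.Chars.isIn [d] ['1','2','3','4','5'] = false := by
  rw [PySem.Chars.isIn_eq_false_iff]
  intro hin
  have hd : d ∈ ['1','2','3','4','5'] := hin.subset (by simp)
  simp at hd
  exact h hd

-- both ports, expressed over the character list of the input
lemma key (cs : List Char) :
    (if PySem.Chars.startswith cs ['l','e','v','e','l','1','_'] = true then (10:Int)
      else if PySem.Chars.startswith cs ['l','e','v','e','l','2','_'] = true then 15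
      else if PySem.Chars.startswith cs ['l','e','v','e','l','3','_'] = true then 20
      else if PySem.Chars.startswith cs ['l','e','v','e','l','4','_'] = true then 25
      else if PySem.Chars.startswith cs ['l','e','v','e','l','5','_'] = true then 30 else 5) =
    (if (PySem.Chars.startswith cs ['l','e','v','e','l'] && decide (7 ≤ (cs.length:Int))) = true then
        match PySem.List.pyGet? cs 5, PySem.List.pyGet? cs 6 with
        | some d, some u =>
          if (PySem.Chars.isIn [d] "12345".toList && u == '_') = true then 5 + 5 * ((d.toNat:Int) - 48) else 5
        | _, _ => 5
      else 5) := by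
  by_cases h5 : ['l','e','v','e','l'] <+: cs
  · obtain ⟨tail, rfl⟩ := h5
    rcases tail with _ | ⟨d, _ | ⟨u, rest⟩⟩
    · simp [PySem.Chars.startswith_iff, List.cons_prefix_cons]
    · simp [PySem.Chars.startswith_iff, List.cons_prefix_cons]
    · have hsw : PySem.Chars.startswith ('l' :: 'e' :: 'v' :: 'e' :: 'l' :: d :: u :: rest)
          ['l', 'e', 'v', 'e', 'l'] = true := by
        rw [PySem.Chars.startswith_iff]; simp [List.cons_prefix_cons]
      simp only [List.cons_append, List.nil_append, PySem.List.pyGet?, PySem.List.pyIdx?,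
        List.length_cons, hsw, Bool.true_and]
      rw [if_pos (show (0:Int) ≤ 5 by norm_num),
          if_pos (show (5:Int) < ((rest.length + 1 + 1 + 1 + 1 + 1 + 1 + 1 : Nat) : Int) by push_cast; omega),
          if_pos (show (0:Int) ≤ 6 by norm_num),
          if_pos (show (6:Int) < ((rest.length + 1 + 1 + 1 + 1 + 1 + 1 + 1 : Nat) : Int) by push_cast; omega)]
      simp only [decide_eq_true_eq]
      rw [if_pos (show (7:Int) ≤ ((rest.length + 1 + 1 + 1 + 1 + 1 + 1 + 1 : Nat) : Int) by push_cast; omega)]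
      by_cases hu : u = '_'
      · subst hu
        by_cases h1 : d = '1'
        · subst h1; norm_num [PySem.Chars.startswith_iff, List.cons_prefix_cons,
            show Int.toNat 5 = 5 from rfl, show Int.toNat 6 = 6 from rfl, List.getElem?_cons,
            show PySem.Chars.isIn ['1'] "12345".toList = true from rfl,
            show ('1').toNat = 49 from rfl]
        · by_cases h2 : d = '2'
          · subst h2; norm_num [PySem.Chars.startswith_iff, List.cons_prefix_cons,
              show Int.toNat 5 = 5 from rfl, show Int.toNat 6 = 6 from rfl, List.getElem?_cons,
              h1, show PySem.Chars.isIn ['2'] "12345".toList = true from rfl,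
              show ('2').toNat = 50 from rfl]
            decide
          · by_cases h3 : d = '3'
            · subst h3; norm_num [PySem.Chars.startswith_iff, List.cons_prefix_cons,
                show Int.toNat 5 = 5 from rfl, show Int.toNat 6 = 6 from rfl, List.getElem?_cons,
                h1, h2, show PySem.Chars.isIn ['3'] "12345".toList = true from rfl,
                show ('3').toNat = 51 from rfl]
              decide
            · by_cases h4 : d = '4'
              · subst h4; norm_num [PySem.Chars.startswith_iff, List.cons_prefix_cons,
                  show Int.toNat 5 = 5 from rfl, show Int.toNat 6 = 6 from rfl, List.getElem?_cons,
                  h1, h2, h3, show PySem.Chars.isIn ['4'] "12345".toList = true from rfl,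
                  show ('4').toNat = 52 from rfl]
                decide
              · by_cases hd5 : d = '5'
                · subst hd5; norm_num [PySem.Chars.startswith_iff, List.cons_prefix_cons,
                    show Int.toNat 5 = 5 from rfl, show Int.toNat 6 = 6 from rfl, List.getElem?_cons,
                    h1, h2, h3, h4,
                    show PySem.Chars.isIn ['5'] "12345".toList = true from rfl,
                    show ('5').toNat = 53 from rfl]
                  decide
                · have hfalse := isIn_sing_false d (by tauto)
                  norm_num [PySem.Chars.startswith_iff, List.cons_prefix_cons,
                    show Int.toNat 5 = 5 from rfl, show Int.toNat 6 = 6 from rfl, List.getElem?_cons]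
                  simp [Ne.symm h1, Ne.symm h2, Ne.symm h3, Ne.symm h4, Ne.symm hd5, hfalse]
      · norm_num [PySem.Chars.startswith_iff, List.cons_prefix_cons,
          show Int.toNat 5 = 5 from rfl, show Int.toNat 6 = 6 from rfl, List.getElem?_cons]
        simp [Ne.symm hu]
        intro _ h; exact absurd h hu
  · have hsw : PySem.Chars.startswith cs ['l','e','v','e','l'] = false := by
      rw [← Bool.not_eq_true, PySem.Chars.startswith_iff]; exact h5
    have hnone : ∀ t : List Char, ['l','e','v','e','l'] <+: t →
        PySem.Chars.startswith cs t = false := by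
      intro t ht
      rw [← Bool.not_eq_true, PySem.Chars.startswith_iff]
      intro hcs; exact h5 (ht.trans hcs)
    rw [hnone _ (by decide), hnone _ (by decide), hnone _ (by decide), hnone _ (by decide),
      hnone _ (by decide), hsw]
    simp

-- ===== VERDICT (by name: the statement is the Claim_ definition above) =====
theorem get_narrative_milestone_points_py_spec : Claim_equal_get_narrative_milestone_points_py := by
  intro fk _
  unfold Spec_get_narrative_milestone_points_py get_narrative_milestone_points_py
    get_narrative_milestone_points_py_alt
  simp only [pvALoop, PySem.Str.startswith_eq, PySem.Str.pyGet?_eq, PySem.Str.len_eq,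
    PySem.Chars.pyGet?_eq_listPyGet?, PySem.Str.isIn_eq, String.toList_ofList,
    show "level1_".toList = ['l','e','v','e','l','1','_'] from rfl,
    show "level2_".toList = ['l','e','v','e','l','2','_'] from rfl,
    show "level3_".toList = ['l','e','v','e','l','3','_'] from rfl,
    show "level4_".toList = ['l','e','v','e','l','4','_'] from rfl,
    show "level5_".toList = ['l','e','v','e','l','5','_'] from rfl,
    show "level".toList = ['l','e','v','e','l'] from rfl]
  exact key fk.toList
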